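-- pv_equiv track=rewrite | github.com/hyoti33333/hyori_programers | 프로그래머스/0/181881. 조건에 맞게 수열 변환하기 2/조건에 맞게 수열 변환하기 2.py | solution
-- ===== SOURCE A (Python) =====
-- def solution(arr):
--     def step(a):
--         res = []
--         for v in a:
--             if v >= 50 and v % 2 == 0:
--                 res.append(v // 2)
--             elif v < 50 and v % 2 == 1:
--                 res.append(v * 2 + 1)
--             else:
--                 res.append(v)
--         return res
--
--     x = 0
--     cur = arr[:]
--     while True:
--         nxt = step(cur)
--         if nxt == cur:
--             return x
--         cur = nxt
--         x += 1
-- ===== SOURCE B (Python) =====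
-- def solution(arr):
--     def f(v):
--         if v >= 50 and v % 2 == 0:
--             return v // 2
--         if v < 50 and v % 2 == 1:
--             return v * 2 + 1
--         return v
--
--     best = 0
--     for v in arr:
--         c = 0
--         while f(v) != v:
--             v = f(v)
--             c += 1
--         best = max(best, c)
--     return best
-- ===== Notes on version B (the rewrite author's own statement) =====
-- stated objective: alternative
-- what changed: Replaces the whole-array lockstep iteration (rebuild and compare the entire list each round) with independent per-element trajectory-length counting, returning the maximum count; the array stabilizes exactly when its slowest element does.
import Mathlib
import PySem

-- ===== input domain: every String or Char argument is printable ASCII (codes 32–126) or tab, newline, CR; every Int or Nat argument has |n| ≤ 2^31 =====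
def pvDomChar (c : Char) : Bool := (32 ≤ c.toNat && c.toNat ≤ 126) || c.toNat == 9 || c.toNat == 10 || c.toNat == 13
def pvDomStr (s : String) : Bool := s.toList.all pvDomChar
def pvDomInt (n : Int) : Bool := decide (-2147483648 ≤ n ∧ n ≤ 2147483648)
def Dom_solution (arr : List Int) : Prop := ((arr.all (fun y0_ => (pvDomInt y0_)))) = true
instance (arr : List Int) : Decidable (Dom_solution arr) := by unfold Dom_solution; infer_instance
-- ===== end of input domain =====

-- B replaces A's lockstep whole-array iteration with per-element trajectory-length counting
-- (maximum over elements), avoiding rebuilding and comparing the whole list every round.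


-- fuel bound for the unbounded Python while-loops of both programs; the proof shows it is
-- never exhausted on inputs satisfying Pre_solution (each element stabilizes well within it)
def pvFuel : Nat := 2147483948

-- ===== PORT A =====
-- A's inner `step`: one pass over the array, appending the transformed value of each element
def stepA (a : List Int) : List Int :=
  a.foldl (fun res v =>
    if 50 ≤ v ∧ PySem.Int.mod v 2 = 0 then res ++ [PySem.Int.floordiv v 2]
    else if v < 50 ∧ PySem.Int.mod v 2 = 1 then res ++ [v * 2 + 1]
    else res ++ [v]) []

-- A's `while True` loop: count rounds until step(cur) == cur
def loopA : Nat → Int → List Int → Int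
  | 0, x, _ => x
  | fuel+1, x, cur =>
    let nxt := stepA cur
    if nxt = cur then x else loopA fuel (x + 1) nxt

def solution (arr : List Int) : Int := loopA pvFuel 0 arr

-- ===== PORT B =====
-- B's single-element transform f
def pvF (v : Int) : Int :=
  if 50 ≤ v ∧ PySem.Int.mod v 2 = 0 then PySem.Int.floordiv v 2
  else if v < 50 ∧ PySem.Int.mod v 2 = 1 then v * 2 + 1
  else v

-- B's inner `while f(v) != v` counting loop
def pvCnt : Nat → Int → Int
  | 0, _ => 0
  | fuel+1, v => if pvF v = v then 0 else 1 + pvCnt fuel (pvF v)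

def solution_alt (arr : List Int) : Int :=
  arr.foldl (fun best v => max best (pvCnt pvFuel v)) 0

-- ===== PRECONDITION & SPEC =====
-- Pre_ excludes arrays containing a negative odd element other than -1: on those A's while-loop
-- never terminates (such an element keeps doubling away from any fixed point), and B diverges too.
def Pre_solution (arr : List Int) : Prop := ∀ v ∈ arr, 0 ≤ v ∨ v % 2 = 0 ∨ v = -1

instance (arr : List Int) : Decidable (Pre_solution arr) := by unfold Pre_solution; infer_instance

def pvWitness_solution : List Int := [51, 100, 3, -4, -1, 0]

def Spec_solution (arr : List Int) (out : Int) : Prop := out = solution_alt arr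
instance (arr : List Int) (out : Int) : Decidable (Spec_solution arr out) := by unfold Spec_solution; infer_instance

-- ===== CLAIM (what is proved, stated in full; the proofs are below) =====
def Claim_equal_solution : Prop := ∀ (arr : List Int), Dom_solution arr → Pre_solution arr → Spec_solution arr (solution arr)

-- ===== LEMMAS AND PROOFS =====

-- elements that A's loop can ever see on admitted inputs
def pvGood (v : Int) : Prop := 0 ≤ v ∨ v % 2 = 0 ∨ v = -1

-- termination measure: 0 on fixed points of pvF (for good v), strictly decreasing along pvF
def pvMu (v : Int) : Nat :=
  if 50 ≤ v ∧ v % 2 = 0 then v.toNat + 151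
  else if 0 ≤ v ∧ v < 50 ∧ v % 2 = 1 ∧ v ≠ -1 then (51 - v).toNat + 100
  else 0

theorem pvF_char (v : Int) :
    pvF v = if 50 ≤ v ∧ v % 2 = 0 then v / 2
            else if v < 50 ∧ v % 2 = 1 then v * 2 + 1 else v := by
  simp [pvF]

theorem stepA_aux (a : List Int) : ∀ acc : List Int,
    a.foldl (fun res v =>
      if 50 ≤ v ∧ PySem.Int.mod v 2 = 0 then res ++ [PySem.Int.floordiv v 2]
      else if v < 50 ∧ PySem.Int.mod v 2 = 1 then res ++ [v * 2 + 1]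
      else res ++ [v]) acc = acc ++ a.map pvF := by
  induction a with
  | nil => intro acc; simp
  | cons v l ih =>
    intro acc
    simp only [List.foldl_cons, List.map_cons, ih]
    unfold pvF
    split_ifs <;> simp

theorem stepA_eq_map (a : List Int) : stepA a = a.map pvF :=
  (stepA_aux a []).trans (List.nil_append _)

theorem good_step {v : Int} (h : pvGood v) : pvGood (pvF v) := by
  rw [pvF_char]
  unfold pvGood at *
  split_ifs with h1 h2 <;> omega

theorem mu_zero_fixed {v : Int} (hg : pvGood v) (h0 : pvMu v = 0) : pvF v = v := by
  rw [pvF_char]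
  unfold pvMu at h0
  unfold pvGood at hg
  split_ifs at h0 ⊢ with h1 h2 <;> omega

theorem mu_decrease {v : Int} (hg : pvGood v) (hne : pvF v ≠ v) : pvMu (pvF v) < pvMu v := by
  rw [pvF_char] at hne ⊢
  unfold pvGood at hg
  by_cases h1 : 50 ≤ v ∧ v % 2 = 0
  · -- halving branch: w = v / 2
    rw [if_pos h1] at hne ⊢
    unfold pvMu
    split_ifs <;> omega
  · rw [if_neg h1] at hne ⊢
    by_cases h2 : v < 50 ∧ v % 2 = 1
    · -- doubling branch: w = v * 2 + 1
      rw [if_pos h2] at hne ⊢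
      unfold pvMu
      split_ifs <;> omega
    · rw [if_neg h2] at hne
      exact absurd rfl hne

theorem cnt_nonneg : ∀ (fuel : Nat) (v : Int), 0 ≤ pvCnt fuel v := by
  intro fuel
  induction fuel with
  | zero => intro v; simp [pvCnt]
  | succ n ih =>
    intro v
    simp only [pvCnt]
    split_ifs
    · exact le_refl 0
    · have := ih (pvF v); omega

theorem cnt_irrel : ∀ (k : Nat) (v : Int), pvGood v → pvMu v ≤ k →
    ∀ f1 f2 : Nat, pvMu v < f1 → pvMu v < f2 → pvCnt f1 v = pvCnt f2 v := by
  intro k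
  induction k with
  | zero =>
    intro v hg hk f1 f2 h1 h2
    have hfix : pvF v = v := mu_zero_fixed hg (by omega)
    obtain ⟨f1', rfl⟩ : ∃ m, f1 = m + 1 := ⟨f1 - 1, by omega⟩
    obtain ⟨f2', rfl⟩ : ∃ m, f2 = m + 1 := ⟨f2 - 1, by omega⟩
    simp [pvCnt, hfix]
  | succ n ih =>
    intro v hg hk f1 f2 h1 h2
    obtain ⟨f1', rfl⟩ : ∃ m, f1 = m + 1 := ⟨f1 - 1, by omega⟩
    obtain ⟨f2', rfl⟩ : ∃ m, f2 = m + 1 := ⟨f2 - 1, by omega⟩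
    simp only [pvCnt]
    split_ifs with hfix
    · rfl
    · have hdec := mu_decrease hg hfix
      have := ih (pvF v) (good_step hg) (by omega) f1' f2' (by omega) (by omega)
      omega

theorem cnt_succ (fuel : Nat) (v : Int) :
    pvCnt (fuel + 1) v = if pvF v = v then 0 else 1 + pvCnt fuel (pvF v) := rfl

theorem fuel_succ : pvFuel = 2147483947 + 1 := by norm_num [pvFuel]

-- one step of pvF decrements a positive count, keeps a zero count
theorem cnt_step {v : Int} (hg : pvGood v) (hmu : pvMu v < pvFuel) :
    pvCnt pvFuel (pvF v) = max (pvCnt pvFuel v - 1) 0 := by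
  have hF : pvFuel = 2147483948 := by norm_num [pvFuel]
  have hv : pvCnt pvFuel v = if pvF v = v then 0 else 1 + pvCnt 2147483947 (pvF v) := by
    rw [fuel_succ]; rfl
  by_cases hfix : pvF v = v
  · rw [hfix, hv, if_pos hfix]; omega
  · have hdec := mu_decrease hg hfix
    have heq : pvCnt 2147483947 (pvF v) = pvCnt pvFuel (pvF v) := by
      rw [fuel_succ]
      exact cnt_irrel (pvMu (pvF v)) (pvF v) (good_step hg) (le_refl _) _ _
        (by omega) (by omega)
    rw [hv, if_neg hfix, heq]
    have := cnt_nonneg pvFuel (pvF v)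
    omega

-- fold-max helpers
theorem mfold_base (g : Int → Int) (hg : ∀ v, 0 ≤ g v) :
    ∀ (l : List Int) (b : Int), 0 ≤ b →
      l.foldl (fun a v => max a (g v)) b = max b (l.foldl (fun a v => max a (g v)) 0) := by
  intro l
  induction l with
  | nil => intro b hb; simp; omega
  | cons v l ih =>
    intro b hb
    simp only [List.foldl_cons]
    rw [ih (max b (g v)) (by have := hg v; omega), ih (max 0 (g v)) (by have := hg v; omega)]
    have := hg v
    omega

theorem mfold_cons (g : Int → Int) (hg : ∀ v, 0 ≤ g v) (v : Int) (l : List Int) :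
    (v :: l).foldl (fun a w => max a (g w)) 0 = max (g v) (l.foldl (fun a w => max a (g w)) 0) := by
  simp only [List.foldl_cons]
  rw [mfold_base g hg l (max 0 (g v)) (by have := hg v; omega)]
  have := hg v
  omega

theorem mfold_nonneg (g : Int → Int) (hg : ∀ v, 0 ≤ g v) (l : List Int) :
    0 ≤ l.foldl (fun a w => max a (g w)) 0 := by
  induction l with
  | nil => simp
  | cons v l ih => rw [mfold_cons g hg]; omega

theorem mfold_zero (g : Int → Int) (hg : ∀ v, 0 ≤ g v) :
    ∀ l : List Int, (∀ v ∈ l, g v = 0) → l.foldl (fun a w => max a (g w)) 0 = 0 := by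
  intro l
  induction l with
  | nil => intro _; simp
  | cons v l ih =>
    intro h
    rw [mfold_cons g hg, h v (by simp), ih (fun w hw => h w (by simp [hw]))]
    omega

theorem mfold_le_mem (g : Int → Int) (hg : ∀ v, 0 ≤ g v) :
    ∀ (l : List Int) (v : Int), v ∈ l → g v ≤ l.foldl (fun a w => max a (g w)) 0 := by
  intro l
  induction l with
  | nil => intro v hv; simp at hv
  | cons u l ih =>
    intro v hv
    rw [mfold_cons g hg]
    rcases List.mem_cons.mp hv with h | h
    · subst h; omega
    · have := ih v h; omega

theorem pvCnt_nonneg' : ∀ v, 0 ≤ pvCnt pvFuel v := fun v => cnt_nonneg pvFuel v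

-- applying pvF to every element decrements a positive maximum, keeps a zero maximum
theorem mfold_map_step : ∀ l : List Int, (∀ v ∈ l, pvGood v ∧ pvMu v < pvFuel) →
    (l.map pvF).foldl (fun a w => max a (pvCnt pvFuel w)) 0 =
      max (l.foldl (fun a w => max a (pvCnt pvFuel w)) 0 - 1) 0 := by
  intro l
  induction l with
  | nil => intro _; simp
  | cons v l ih =>
    intro h
    obtain ⟨hg, hmu⟩ := h v (by simp)
    simp only [List.map_cons]
    rw [mfold_cons _ pvCnt_nonneg', mfold_cons _ pvCnt_nonneg',
        ih (fun w hw => h w (by simp [hw])), cnt_step hg hmu]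
    have h1 := cnt_nonneg pvFuel v
    have h2 := mfold_nonneg _ pvCnt_nonneg' l
    omega

theorem map_fixed_iff (l : List Int) : l.map pvF = l ↔ ∀ v ∈ l, pvF v = v := by
  induction l with
  | nil => simp
  | cons v l ih => simp_all

-- main loop invariant: A's loop returns x plus the maximum per-element count
theorem loop_eq : ∀ (fuel : Nat) (cur : List Int) (x : Int),
    (∀ v ∈ cur, pvGood v ∧ pvMu v < fuel) → fuel ≤ pvFuel →
    loopA fuel x cur = x + cur.foldl (fun a w => max a (pvCnt pvFuel w)) 0 := by
  intro fuel
  induction fuel with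
  | zero =>
    intro cur x h hle
    cases cur with
    | nil => simp [loopA]
    | cons v l => exact absurd (h v (by simp)).2 (by omega)
  | succ n ih =>
    intro cur x h hle
    simp only [loopA, stepA_eq_map]
    split_ifs with hfix
    · -- every element is fixed: every count is 0
      rw [mfold_zero _ pvCnt_nonneg' cur]
      · omega
      · intro v hv
        have hf := (map_fixed_iff cur).mp hfix v hv
        rw [fuel_succ, cnt_succ]
        simp [hf]
    · -- some element moves
      obtain ⟨v₀, hv₀, hne₀⟩ : ∃ v ∈ cur, pvF v ≠ v := by
        by_contra hc
        push Not at hc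
        exact hfix ((map_fixed_iff cur).mpr hc)
      have hn1 : 1 ≤ n := by
        by_contra hn
        obtain ⟨hg, hmu⟩ := h v₀ hv₀
        exact hne₀ (mu_zero_fixed hg (by omega))
      have hmap : ∀ w ∈ cur.map pvF, pvGood w ∧ pvMu w < n := by
        intro w hw
        obtain ⟨v, hv, rfl⟩ := List.mem_map.mp hw
        obtain ⟨hg, hmu⟩ := h v hv
        refine ⟨good_step hg, ?_⟩
        by_cases hf : pvF v = v
        · rw [hf]
          have : pvMu v = 0 := by
            by_contra hnz
            unfold pvMu at hnz
            rw [pvF_char] at hf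
            split_ifs at hf hnz <;> omega
          omega
        · have := mu_decrease hg hf; omega
      rw [ih (cur.map pvF) (x + 1) hmap (by omega), mfold_map_step cur
            (fun v hv => ⟨(h v hv).1, by have := (h v hv).2; omega⟩)]
      have hpos : 1 ≤ cur.foldl (fun a w => max a (pvCnt pvFuel w)) 0 := by
        have hle0 := mfold_le_mem _ pvCnt_nonneg' cur v₀ hv₀
        have : 1 ≤ pvCnt pvFuel v₀ := by
          rw [fuel_succ, cnt_succ]
          simp only [hne₀, if_neg, not_false_iff]
          have := cnt_nonneg 2147483947 (pvF v₀)
          omega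
        omega
      omega

theorem mu_bound {v : Int} (hd : v ≤ 2147483648) : pvMu v < pvFuel := by
  unfold pvMu pvFuel
  split_ifs <;> omega

-- ===== VERDICT (by name: the statement is the Claim_ definition above) =====
theorem solution_spec : Claim_equal_solution := by
  intro arr hdom hpre
  unfold Spec_solution solution solution_alt
  have hall : ∀ v ∈ arr, pvGood v ∧ pvMu v < pvFuel := by
    intro v hv
    refine ⟨hpre v hv, ?_⟩
    have : pvDomInt v = true := by
      unfold Dom_solution at hdom
      rw [List.all_eq_true] at hdom
      exact hdom v hv
    simp only [pvDomInt, decide_eq_true_eq] at this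
    exact mu_bound this.2
  rw [loop_eq pvFuel arr 0 hall (le_refl _)]
  omega
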